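-- pv_equiv track=rewrite | github.com/Pramod-Potti-Krishnan/text-table-builder-v1.2 | app/core/iseries/base_iseries_generator.py | _extract_action_composition
-- ===== SOURCE A (Python) =====
-- def _extract_action_composition(narrative: str) -> str:
--     """Extract action/composition hint from narrative."""
--     # Look for action verbs or descriptive phrases
--     narrative_lower = narrative.lower()
--
--     if any(word in narrative_lower for word in ["transform", "change", "evolve"]):
--         return "transforming with flowing energy"
--     elif any(word in narrative_lower for word in ["grow", "expand", "scale"]):
--         return "expanding with dynamic motion"
--     elif any(word in narrative_lower for word in ["connect", "integrate", "link"]):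
--         return "with interconnected flowing lines"
--     elif any(word in narrative_lower for word in ["speed", "fast", "quick", "efficient"]):
--         return "with swift dynamic movement"
--     elif any(word in narrative_lower for word in ["secure", "protect", "safe"]):
--         return "with protective geometric patterns"
--     elif any(word in narrative_lower for word in ["innovate", "create", "new"]):
--         return "emerging with creative energy"
--     else:
--         return "with elegant flowing composition"
-- ===== SOURCE B (Python) =====
-- # Single pass with a best-(priority, hint) accumulator over a flat keyword table,
-- # instead of testing keyword groups in priority order with early returns.
-- _TABLE = [
--     ("transform", 0, "transforming with flowing energy"),
--     ("change", 0, "transforming with flowing energy"),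
--     ("evolve", 0, "transforming with flowing energy"),
--     ("grow", 1, "expanding with dynamic motion"),
--     ("expand", 1, "expanding with dynamic motion"),
--     ("scale", 1, "expanding with dynamic motion"),
--     ("connect", 2, "with interconnected flowing lines"),
--     ("integrate", 2, "with interconnected flowing lines"),
--     ("link", 2, "with interconnected flowing lines"),
--     ("speed", 3, "with swift dynamic movement"),
--     ("fast", 3, "with swift dynamic movement"),
--     ("quick", 3, "with swift dynamic movement"),
--     ("efficient", 3, "with swift dynamic movement"),
--     ("secure", 4, "with protective geometric patterns"),
--     ("protect", 4, "with protective geometric patterns"),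
--     ("safe", 4, "with protective geometric patterns"),
--     ("innovate", 5, "emerging with creative energy"),
--     ("create", 5, "emerging with creative energy"),
--     ("new", 5, "emerging with creative energy"),
-- ]
--
-- def _extract_action_composition(narrative: str) -> str:
--     low = narrative.lower()
--     best_pri, best_hint = 6, "with elegant flowing composition"
--     for word, pri, hint in _TABLE:
--         if pri < best_pri and word in low:
--             best_pri, best_hint = pri, hint
--     return best_hint
-- ===== Notes on version B (the rewrite author's own statement) =====
-- stated objective: alternative
-- what changed: Replaced the six-branch if/elif chain of group-level any() tests with early returns by a single full pass over a flat (keyword, priority, hint) table that keeps a minimum-priority accumulator and returns the best hint at the end.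
import Mathlib
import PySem

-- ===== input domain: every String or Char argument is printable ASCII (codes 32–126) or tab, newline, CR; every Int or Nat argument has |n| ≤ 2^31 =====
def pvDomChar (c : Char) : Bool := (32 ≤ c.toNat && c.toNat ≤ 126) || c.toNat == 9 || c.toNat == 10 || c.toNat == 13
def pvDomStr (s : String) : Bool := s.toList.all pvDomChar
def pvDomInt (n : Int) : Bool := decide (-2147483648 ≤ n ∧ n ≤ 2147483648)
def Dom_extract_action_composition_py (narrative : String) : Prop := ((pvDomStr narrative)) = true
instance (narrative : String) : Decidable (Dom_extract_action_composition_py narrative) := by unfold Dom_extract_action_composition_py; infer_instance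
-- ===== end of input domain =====

-- B replaces A's prioritized if/elif chain with early returns by one full pass over a
-- flat (keyword, priority, hint) table keeping a minimum-priority accumulator (objective: alternative).

-- ===== PORT A =====
def extract_action_composition_py (narrative : String) : String :=
  let narrative_lower := PySem.Str.lower narrative
  if ["transform", "change", "evolve"].any (fun word => PySem.Str.isIn word narrative_lower) then
    "transforming with flowing energy"
  else if ["grow", "expand", "scale"].any (fun word => PySem.Str.isIn word narrative_lower) then
    "expanding with dynamic motion"
  else if ["connect", "integrate", "link"].any (fun word => PySem.Str.isIn word narrative_lower) then
    "with interconnected flowing lines"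
  else if ["speed", "fast", "quick", "efficient"].any (fun word => PySem.Str.isIn word narrative_lower) then
    "with swift dynamic movement"
  else if ["secure", "protect", "safe"].any (fun word => PySem.Str.isIn word narrative_lower) then
    "with protective geometric patterns"
  else if ["innovate", "create", "new"].any (fun word => PySem.Str.isIn word narrative_lower) then
    "emerging with creative energy"
  else
    "with elegant flowing composition"

-- ===== PORT B =====
def pvTable : List (String × Nat × String) :=
  [ ("transform", 0, "transforming with flowing energy"),
    ("change", 0, "transforming with flowing energy"),
    ("evolve", 0, "transforming with flowing energy"),
    ("grow", 1, "expanding with dynamic motion"),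
    ("expand", 1, "expanding with dynamic motion"),
    ("scale", 1, "expanding with dynamic motion"),
    ("connect", 2, "with interconnected flowing lines"),
    ("integrate", 2, "with interconnected flowing lines"),
    ("link", 2, "with interconnected flowing lines"),
    ("speed", 3, "with swift dynamic movement"),
    ("fast", 3, "with swift dynamic movement"),
    ("quick", 3, "with swift dynamic movement"),
    ("efficient", 3, "with swift dynamic movement"),
    ("secure", 4, "with protective geometric patterns"),
    ("protect", 4, "with protective geometric patterns"),
    ("safe", 4, "with protective geometric patterns"),
    ("innovate", 5, "emerging with creative energy"),
    ("create", 5, "emerging with creative energy"),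
    ("new", 5, "emerging with creative energy") ]

def pvStep (low : String) (best : Nat × String) (e : String × Nat × String) : Nat × String :=
  if e.2.1 < best.1 ∧ PySem.Str.isIn e.1 low = true then (e.2.1, e.2.2) else best

def extract_action_composition_py_alt (narrative : String) : String :=
  let low := PySem.Str.lower narrative
  (pvTable.foldl (pvStep low) (6, "with elegant flowing composition")).2

-- ===== PRECONDITION & SPEC =====
def Spec_extract_action_composition_py (narrative : String) (out : String) : Prop := out = extract_action_composition_py_alt narrative
instance (narrative : String) (out : String) : Decidable (Spec_extract_action_composition_py narrative out) := by unfold Spec_extract_action_composition_py; infer_instance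

-- ===== CLAIM (what is proved, stated in full; the proofs are below) =====
def Claim_equal_extract_action_composition_py : Prop := ∀ (narrative : String), Dom_extract_action_composition_py narrative → Spec_extract_action_composition_py narrative (extract_action_composition_py narrative)

-- ===== LEMMAS AND PROOFS =====

def pvGroup (ws : List String) (p : Nat) (h : String) : List (String × Nat × String) :=
  ws.map (fun w => (w, p, h))

theorem pvTable_eq : pvTable =
    pvGroup ["transform", "change", "evolve"] 0 "transforming with flowing energy" ++
    (pvGroup ["grow", "expand", "scale"] 1 "expanding with dynamic motion" ++
    (pvGroup ["connect", "integrate", "link"] 2 "with interconnected flowing lines" ++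
    (pvGroup ["speed", "fast", "quick", "efficient"] 3 "with swift dynamic movement" ++
    (pvGroup ["secure", "protect", "safe"] 4 "with protective geometric patterns" ++
    pvGroup ["innovate", "create", "new"] 5 "emerging with creative energy")))) := rfl

-- folding one keyword group: the accumulator drops to (p, h) iff some keyword occurs and p beats it
theorem pv_fold_group (low : String) (p : Nat) (h : String) (ws : List String) (acc : Nat × String) :
    List.foldl (pvStep low) acc (pvGroup ws p h) =
      (if p < acc.1 ∧ ws.any (fun w => PySem.Str.isIn w low) = true then (p, h) else acc) := by
  induction ws generalizing acc with
  | nil => simp [pvGroup]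
  | cons w t ih =>
    simp only [pvGroup, List.map_cons, List.foldl_cons, List.any_cons, Bool.or_eq_true]
    by_cases hw : PySem.Str.isIn w low = true
    · by_cases hp : p < acc.1
      · have hstep : pvStep low acc (w, p, h) = (p, h) := by
          unfold pvStep; exact if_pos ⟨hp, hw⟩
        rw [hstep]
        rw [show List.foldl (pvStep low) (p, h) (t.map (fun w => (w, p, h))) =
              List.foldl (pvStep low) (p, h) (pvGroup t p h) from rfl, ih]
        rw [if_neg (fun hc => lt_irrefl p hc.1), if_pos ⟨hp, Or.inl hw⟩]
      · have hstep : pvStep low acc (w, p, h) = acc := by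
          unfold pvStep; exact if_neg (fun hc => hp hc.1)
        rw [hstep]
        rw [show List.foldl (pvStep low) acc (t.map (fun w => (w, p, h))) =
              List.foldl (pvStep low) acc (pvGroup t p h) from rfl, ih]
        rw [if_neg (fun hc => hp hc.1), if_neg (fun hc => hp hc.1)]
    · have hstep : pvStep low acc (w, p, h) = acc := by
        unfold pvStep; exact if_neg (fun hc => hw hc.2)
      rw [hstep]
      rw [show List.foldl (pvStep low) acc (t.map (fun w => (w, p, h))) =
            List.foldl (pvStep low) acc (pvGroup t p h) from rfl, ih]
      rw [Bool.not_eq_true] at hw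
      simp only [hw, Bool.false_eq_true, false_or]

-- ===== VERDICT (by name: the statement is the Claim_ definition above) =====
theorem extract_action_composition_py_spec : Claim_equal_extract_action_composition_py := by
  intro narrative _
  unfold Spec_extract_action_composition_py extract_action_composition_py extract_action_composition_py_alt
  rw [pvTable_eq]
  dsimp only
  rw [List.foldl_append, List.foldl_append, List.foldl_append, List.foldl_append,
    List.foldl_append, pv_fold_group, pv_fold_group, pv_fold_group, pv_fold_group,
    pv_fold_group, pv_fold_group]
  generalize List.any ["transform", "change", "evolve"]
    (fun w => PySem.Str.isIn w (PySem.Str.lower narrative)) = b0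
  generalize List.any ["grow", "expand", "scale"]
    (fun w => PySem.Str.isIn w (PySem.Str.lower narrative)) = b1
  generalize List.any ["connect", "integrate", "link"]
    (fun w => PySem.Str.isIn w (PySem.Str.lower narrative)) = b2
  generalize List.any ["speed", "fast", "quick", "efficient"]
    (fun w => PySem.Str.isIn w (PySem.Str.lower narrative)) = b3
  generalize List.any ["secure", "protect", "safe"]
    (fun w => PySem.Str.isIn w (PySem.Str.lower narrative)) = b4
  generalize List.any ["innovate", "create", "new"]
    (fun w => PySem.Str.isIn w (PySem.Str.lower narrative)) = b5
  revert b0 b1 b2 b3 b4 b5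
  decide
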